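-- pv_equiv track=rewrite | github.com/NotSMX/SquadSync | website/views.py | _intersect_intervals
-- ===== SOURCE A (Python) =====
-- def _intersect_intervals(intervals_a, intervals_b):
--     """Return list of (start, end) that lie in both interval lists. Merged."""
--     out = []
--     for (a_s, a_e) in intervals_a:
--         for (b_s, b_e) in intervals_b:
--             s = max(a_s, b_s)
--             e = min(a_e, b_e)
--             if s < e:
--                 out.append((s, e))
--     if not out:
--         return []
--     out.sort(key=lambda x: x[0])
--     merged = [out[0]]
--     for s, e in out[1:]:
--         if s <= merged[-1][1]:
--             merged[-1] = (merged[-1][0], max(merged[-1][1], e))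
--         else:
--             merged.append((s, e))
--     return merged
-- ===== SOURCE B (Python) =====
-- def _merge_sorted(ivs):
--     """Merge a start-sorted list of nonempty intervals; touching intervals fuse."""
--     out = []
--     if not ivs:
--         return out
--     cs, ce = ivs[0]
--     for s, e in ivs[1:]:
--         if s <= ce:
--             ce = max(ce, e)
--         else:
--             out.append((cs, ce))
--             cs, ce = s, e
--     out.append((cs, ce))
--     return out
--
--
-- def _canon(intervals):
--     """Canonical merged form of an interval list: drop empties, sort, merge."""
--     return _merge_sorted(sorted((iv for iv in intervals if iv[0] < iv[1]),
--                                key=lambda iv: iv[0]))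
--
--
-- def _intersect_intervals(intervals_a, intervals_b):
--     """Return list of (start, end) that lie in both interval lists. Merged."""
--     xs = _canon(intervals_a)
--     ys = _canon(intervals_b)
--     out = []
--     i = j = 0
--     while i < len(xs) and j < len(ys):
--         s = max(xs[i][0], ys[j][0])
--         e = min(xs[i][1], ys[j][1])
--         if s < e:
--             out.append((s, e))
--         if xs[i][1] <= ys[j][1]:
--             i += 1
--         else:
--             j += 1
--     return out
-- ===== Notes on version B (the rewrite author's own statement) =====
-- stated objective: faster
-- what changed: Instead of forming all n*m pairwise intersections and sorting them before merging, B canonicalises each input list once (filter, sort, merge) and intersects the two canonical lists with a single two-pointer sweep whose output is already merged and sorted.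
import Mathlib
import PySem

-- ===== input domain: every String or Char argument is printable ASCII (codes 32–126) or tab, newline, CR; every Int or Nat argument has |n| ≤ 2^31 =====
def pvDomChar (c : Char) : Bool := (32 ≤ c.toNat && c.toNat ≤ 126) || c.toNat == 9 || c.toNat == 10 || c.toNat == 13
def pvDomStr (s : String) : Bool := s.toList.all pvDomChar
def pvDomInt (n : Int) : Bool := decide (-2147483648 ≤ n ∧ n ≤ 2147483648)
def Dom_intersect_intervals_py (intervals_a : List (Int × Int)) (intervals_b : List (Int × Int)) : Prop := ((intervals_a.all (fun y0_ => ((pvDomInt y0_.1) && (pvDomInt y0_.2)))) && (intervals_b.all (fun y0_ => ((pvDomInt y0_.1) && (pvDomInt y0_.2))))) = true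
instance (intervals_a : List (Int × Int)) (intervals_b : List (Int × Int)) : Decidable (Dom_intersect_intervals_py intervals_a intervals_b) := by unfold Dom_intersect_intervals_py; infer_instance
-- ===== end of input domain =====

-- B replaces A's quadratic all-pairs intersection + sort + merge by: canonicalise each
-- input list once (filter empties, sort by start, merge) and a two-pointer sweep.
-- Return values are proved equal on every input (both functions are total).

-- ===== PORT A =====
-- the merge loop over `out[1:]`, mutating `merged[-1]` (ported as getLast?/dropLast)
def pvMergeLoopA (merged : List (Int × Int)) (rest : List (Int × Int)) : List (Int × Int) :=
  rest.foldl (fun m p =>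
    match m.getLast? with
    | some q => if p.1 ≤ q.2 then m.dropLast ++ [(q.1, max q.2 p.2)] else m ++ [p]
    | none => m ++ [p]) merged

def intersect_intervals_py (intervals_a : List (Int × Int)) (intervals_b : List (Int × Int)) : List (Int × Int) :=
  let out := intervals_a.foldl (fun out a =>
    intervals_b.foldl (fun out b =>
      let s := max a.1 b.1
      let e := min a.2 b.2
      if s < e then out ++ [(s, e)] else out) out) []
  if out = [] then []
  else
    let out2 := PySem.List.sorted out (fun x => x.1) false
    match out2 with
    | [] => []                                  -- unreachable: out ≠ [] so its sort is nonempty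
    | h :: t => pvMergeLoopA [h] t

-- ===== PORT B =====
-- _merge_sorted's loop carries (cs, ce) and the emitted prefix; ported as structural recursion
def pvMergeGoB (cs ce : Int) : List (Int × Int) → List (Int × Int)
  | [] => [(cs, ce)]
  | (s, e) :: t => if s ≤ ce then pvMergeGoB cs (max ce e) t else (cs, ce) :: pvMergeGoB s e t

def pvMergeSortedB (ivs : List (Int × Int)) : List (Int × Int) :=
  match ivs with
  | [] => []
  | (cs, ce) :: rest => pvMergeGoB cs ce rest

def pvCanonB (intervals : List (Int × Int)) : List (Int × Int) :=
  pvMergeSortedB (PySem.List.sorted (intervals.filter (fun iv => iv.1 < iv.2)) (fun iv => iv.1) false)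

-- the while-loop over indices i, j; ported as recursion on the two suffixes
def pvSweepB : List (Int × Int) → List (Int × Int) → List (Int × Int)
  | [], _ => []
  | _ :: _, [] => []
  | x :: xs, y :: ys =>
    let s := max x.1 y.1
    let e := min x.2 y.2
    let rest := if x.2 ≤ y.2 then pvSweepB xs (y :: ys) else pvSweepB (x :: xs) ys
    if s < e then (s, e) :: rest else rest
termination_by la lb => la.length + lb.length

def intersect_intervals_py_alt (intervals_a : List (Int × Int)) (intervals_b : List (Int × Int)) : List (Int × Int) :=
  pvSweepB (pvCanonB intervals_a) (pvCanonB intervals_b)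

-- ===== PRECONDITION & SPEC =====
def Spec_intersect_intervals_py (intervals_a : List (Int × Int)) (intervals_b : List (Int × Int)) (out : List (Int × Int)) : Prop := out = intersect_intervals_py_alt intervals_a intervals_b
instance (intervals_a : List (Int × Int)) (intervals_b : List (Int × Int)) (out : List (Int × Int)) : Decidable (Spec_intersect_intervals_py intervals_a intervals_b out) := by unfold Spec_intersect_intervals_py; infer_instance

-- ===== CLAIM (what is proved, stated in full; the proofs are below) =====
def Claim_equal_intersect_intervals_py : Prop := ∀ (intervals_a : List (Int × Int)) (intervals_b : List (Int × Int)), Dom_intersect_intervals_py intervals_a intervals_b → Spec_intersect_intervals_py intervals_a intervals_b (intersect_intervals_py intervals_a intervals_b)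

-- ===== LEMMAS AND PROOFS =====

-- x lies in the half-open interval p = [p.1, p.2)
def pvMemI (x : Int) (p : Int × Int) : Prop := p.1 ≤ x ∧ x < p.2
-- x lies in the union of the intervals of l
def pvMemU (x : Int) (l : List (Int × Int)) : Prop := ∃ p ∈ l, pvMemI x p
-- canonical form: nonempty intervals, sorted and strictly separated
def pvCanon (l : List (Int × Int)) : Prop :=
  (∀ p ∈ l, p.1 < p.2) ∧ l.IsChain (fun p q => p.2 < q.1)

theorem pvMemU_nil (x : Int) : pvMemU x [] ↔ False := by simp [pvMemU]

theorem pvMemU_cons (x : Int) (p : Int × Int) (l : List (Int × Int)) :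
    pvMemU x (p :: l) ↔ pvMemI x p ∨ pvMemU x l := by
  simp [pvMemU, or_and_right, exists_or]

theorem pvMemU_of_perm {l l' : List (Int × Int)} (h : l.Perm l') (x : Int) :
    pvMemU x l ↔ pvMemU x l' := by
  unfold pvMemU; constructor <;> rintro ⟨p, hp, hm⟩
  · exact ⟨p, h.mem_iff.mp hp, hm⟩
  · exact ⟨p, h.mem_iff.mpr hp, hm⟩

theorem pvStartsGt : ∀ (h : Int × Int) (t : List (Int × Int)), pvCanon (h :: t) →
    ∀ p ∈ t, h.2 < p.1 := by
  intro h t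
  induction t generalizing h with
  | nil => intro _ p hp; simp at hp
  | cons q t' ih =>
    rintro ⟨hlt, hch⟩ p hp
    rw [List.isChain_cons_cons] at hch
    rcases List.mem_cons.mp hp with rfl | hp
    · exact hch.1
    · have hq : pvCanon (q :: t') := ⟨fun r hr => hlt r (List.mem_cons_of_mem _ hr), hch.2⟩
      have := ih q hq p hp
      have hq12 : q.1 < q.2 := hlt q (List.mem_cons_of_mem _ List.mem_cons_self)
      omega

-- canonical lists with the same point set are equal
theorem pvUniq : ∀ (l1 l2 : List (Int × Int)), pvCanon l1 → pvCanon l2 →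
    (∀ x, pvMemU x l1 ↔ pvMemU x l2) → l1 = l2 := by
  intro l1
  induction l1 with
  | nil =>
    intro l2 _ h2 hiff
    cases l2 with
    | nil => rfl
    | cons p t =>
      exfalso
      have hp : pvMemU p.1 (p :: t) :=
        ⟨p, List.mem_cons_self, le_refl _, h2.1 p List.mem_cons_self⟩
      exact (pvMemU_nil p.1).mp ((hiff p.1).mpr hp)
  | cons a t1 ih =>
    intro l2 h1 h2 hiff
    cases l2 with
    | nil =>
      exfalso
      have ha : pvMemU a.1 (a :: t1) :=
        ⟨a, List.mem_cons_self, le_refl _, h1.1 a List.mem_cons_self⟩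
      exact (pvMemU_nil a.1).mp ((hiff a.1).mp ha)
    | cons b t2 =>
      have ha12 : a.1 < a.2 := h1.1 a List.mem_cons_self
      have hb12 : b.1 < b.2 := h2.1 b List.mem_cons_self
      have hsg1 := pvStartsGt a t1 h1
      have hsg2 := pvStartsGt b t2 h2
      -- starts agree
      have hstart : a.1 = b.1 := by
        have hm1 : pvMemU a.1 (b :: t2) :=
          (hiff a.1).mp ⟨a, List.mem_cons_self, le_refl _, ha12⟩
        have hm2 : pvMemU b.1 (a :: t1) :=
          (hiff b.1).mpr ⟨b, List.mem_cons_self, le_refl _, hb12⟩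
      -- each start is ≥ the other
        have h12 : b.1 ≤ a.1 := by
          rcases (pvMemU_cons _ _ _).mp hm1 with hh | ⟨p, hp, hmp⟩
          · exact hh.1
          · have := hsg2 p hp; have := hmp.1; omega
        have h21 : a.1 ≤ b.1 := by
          rcases (pvMemU_cons _ _ _).mp hm2 with hh | ⟨p, hp, hmp⟩
          · exact hh.1
          · have := hsg1 p hp; have := hmp.1; omega
        omega
      -- ends agree
      have hend : a.2 = b.2 := by
        by_contra hne
        rcases lt_or_gt_of_ne hne with hlt | hgt
        · -- a.2 < b.2 : the point a.2 is in l2 but not l1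
          have hm : pvMemU a.2 (b :: t2) :=
            ⟨b, List.mem_cons_self, by omega, hlt⟩
          rcases (pvMemU_cons _ _ _).mp ((hiff a.2).mpr hm) with hh | ⟨p, hp, hmp⟩
          · exact absurd hh.2 (by omega)
          · have := hsg1 p hp; have := hmp.1; omega
        · have hm : pvMemU b.2 (a :: t1) :=
            ⟨a, List.mem_cons_self, by omega, hgt⟩
          rcases (pvMemU_cons _ _ _).mp ((hiff b.2).mp hm) with hh | ⟨p, hp, hmp⟩
          · exact absurd hh.2 (by omega)
          · have := hsg2 p hp; have := hmp.1; omega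
      -- tails have equal point sets
      have htl : t1 = t2 := by
        apply ih t2
        · exact ⟨fun p hp => h1.1 p (List.mem_cons_of_mem _ hp), h1.2.of_cons⟩
        · exact ⟨fun p hp => h2.1 p (List.mem_cons_of_mem _ hp), h2.2.of_cons⟩
        · intro x
          constructor
          · rintro ⟨p, hp, hmp⟩
            have hxa : a.2 < x := by have := hsg1 p hp; have := hmp.1; omega
            have : pvMemU x (b :: t2) :=
              (hiff x).mp ((pvMemU_cons _ _ _).mpr (Or.inr ⟨p, hp, hmp⟩))
            rcases (pvMemU_cons _ _ _).mp this with hh | htail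
            · exact absurd hh.2 (by omega)
            · exact htail
          · rintro ⟨p, hp, hmp⟩
            have hxb : b.2 < x := by have := hsg2 p hp; have := hmp.1; omega
            have : pvMemU x (a :: t1) :=
              (hiff x).mpr ((pvMemU_cons _ _ _).mpr (Or.inr ⟨p, hp, hmp⟩))
            rcases (pvMemU_cons _ _ _).mp this with hh | htail
            · exact absurd hh.2 (by omega)
            · exact htail
      have hab : a = b := Prod.ext hstart hend
      rw [hab, htl]

-- specification of the shared merge recursion
theorem pvMergeGoB_spec : ∀ (l : List (Int × Int)) (cs ce : Int), cs < ce →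
    (∀ p ∈ l, p.1 < p.2) → (∀ p ∈ l, cs ≤ p.1) →
    l.Pairwise (fun p q => p.1 ≤ q.1) →
    pvCanon (pvMergeGoB cs ce l) ∧
    (∀ x, pvMemU x (pvMergeGoB cs ce l) ↔ (cs ≤ x ∧ x < ce) ∨ pvMemU x l) ∧
    (∃ e' t', pvMergeGoB cs ce l = (cs, e') :: t') := by
  intro l
  induction l with
  | nil =>
    intro cs ce hlt _ _ _
    have h0 : pvMergeGoB cs ce [] = [(cs, ce)] := rfl
    rw [h0]
    refine ⟨⟨?_, List.IsChain.singleton _⟩, ?_, ce, [], rfl⟩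
    · intro p hp
      rw [List.mem_singleton] at hp
      subst hp; exact hlt
    · intro x
      rw [pvMemU_cons, pvMemU_nil]
      unfold pvMemI
      tauto
  | cons q t ih =>
    rintro cs ce hlt hall hge hpw
    obtain ⟨s, e⟩ := q
    have hse : s < e := hall (s, e) List.mem_cons_self
    have hcs : cs ≤ s := hge (s, e) List.mem_cons_self
    have hpt : t.Pairwise (fun p q => p.1 ≤ q.1) := (List.pairwise_cons.mp hpw).2
    have hst : ∀ p ∈ t, s ≤ p.1 := (List.pairwise_cons.mp hpw).1
    have hallt : ∀ p ∈ t, p.1 < p.2 := fun p hp => hall p (List.mem_cons_of_mem _ hp)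
    by_cases hcase : s ≤ ce
    · have hres : pvMergeGoB cs ce ((s, e) :: t) = pvMergeGoB cs (max ce e) t := by
        simp [pvMergeGoB, hcase]
      obtain ⟨hc, hm, he', t', heq⟩ := ih cs (max ce e) (by omega)
        hallt (fun p hp => by have := hst p hp; omega) hpt
      refine ⟨by rw [hres]; exact hc, ?_, by rw [hres]; exact ⟨he', t', heq⟩⟩
      intro x
      rw [hres, hm x, pvMemU_cons]
      unfold pvMemI
      constructor
      · rintro (h | h)
        · rcases le_or_gt ce x with hx | hx
          · exact Or.inr (Or.inl ⟨by omega, by omega⟩)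
          · exact Or.inl ⟨h.1, hx⟩
        · exact Or.inr (Or.inr h)
      · rintro (h | h | h)
        · exact Or.inl ⟨h.1, by omega⟩
        · exact Or.inl ⟨by omega, by omega⟩
        · exact Or.inr h
    · have hres : pvMergeGoB cs ce ((s, e) :: t) = (cs, ce) :: pvMergeGoB s e t := by
        simp [pvMergeGoB, hcase]
      obtain ⟨hc, hm, he', t', heq⟩ := ih s e hse hallt hst hpt
      refine ⟨⟨?_, ?_⟩, ?_, ce, pvMergeGoB s e t, hres⟩
      · intro p hp
        rw [hres] at hp
        rcases List.mem_cons.mp hp with rfl | hp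
        · exact hlt
        · exact hc.1 p hp
      · rw [hres, heq, List.isChain_cons_cons]
        exact ⟨by change ce < s; omega, by rw [← heq]; exact hc.2⟩
      · intro x
        rw [hres, pvMemU_cons, hm x, pvMemU_cons]
        unfold pvMemI
        tauto

-- point set of B's canonicalisation, and its canonicity
theorem pvCanonB_spec (l : List (Int × Int)) :
    pvCanon (pvCanonB l) ∧ (∀ x, pvMemU x (pvCanonB l) ↔ pvMemU x l) := by
  unfold pvCanonB pvMergeSortedB
  set f := l.filter (fun iv => iv.1 < iv.2) with hf
  have hperm := PySem.List.sorted_perm f (fun iv => iv.1) false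
  have hpw := PySem.List.sorted_pairwise f (fun iv => iv.1)
  have hmemf : ∀ x, pvMemU x f ↔ pvMemU x l := by
    intro x
    unfold pvMemU
    constructor
    · rintro ⟨p, hp, hm⟩; exact ⟨p, (List.mem_filter.mp hp).1, hm⟩
    · rintro ⟨p, hp, hm⟩
      exact ⟨p, List.mem_filter.mpr ⟨hp, by have := hm.1; have := hm.2; simp; omega⟩, hm⟩
  have hmems : ∀ x, pvMemU x (PySem.List.sorted f (fun iv => iv.1) false) ↔ pvMemU x l :=
    fun x => (pvMemU_of_perm hperm x).trans (hmemf x)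
  have halls : ∀ p ∈ PySem.List.sorted f (fun iv => iv.1) false, p.1 < p.2 := by
    intro p hp
    have : p ∈ f := hperm.mem_iff.mp hp
    simpa using (List.mem_filter.mp this).2
  cases hs : PySem.List.sorted f (fun iv => iv.1) false with
  | nil =>
    refine ⟨⟨by simp, by simp⟩, ?_⟩
    intro x
    rw [← hmems x, hs]
  | cons h t =>
    rw [hs] at hpw halls
    obtain ⟨h1, h2⟩ := h
    obtain ⟨hc, hm, _⟩ := pvMergeGoB_spec t h1 h2 (halls (h1, h2) List.mem_cons_self)
      (fun p hp => halls p (List.mem_cons_of_mem _ hp))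
      (by simpa using (List.pairwise_cons.mp hpw).1)
      (List.pairwise_cons.mp hpw).2
    refine ⟨hc, ?_⟩
    intro x
    rw [hm x, ← hmems x, hs, pvMemU_cons]
    unfold pvMemI
    tauto

-- specification of the two-pointer sweep on canonical inputs
theorem pvSweepB_spec : ∀ (la lb : List (Int × Int)), pvCanon la → pvCanon lb →
    pvCanon (pvSweepB la lb) ∧
    (∀ x, pvMemU x (pvSweepB la lb) ↔ pvMemU x la ∧ pvMemU x lb) ∧
    (∀ p ∈ pvSweepB la lb, (∃ q ∈ la, q.1 ≤ p.1) ∧ (∃ q ∈ lb, q.1 ≤ p.1)) := by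
  intro la lb
  induction la, lb using pvSweepB.induct with
  | case1 lb =>
    intro _ _
    refine ⟨⟨by simp [pvSweepB], by simp [pvSweepB]⟩, ?_, by simp [pvSweepB]⟩
    intro x; simp [pvSweepB, pvMemU_nil]
  | case2 h t =>
    intro _ _
    refine ⟨⟨by simp [pvSweepB], by simp [pvSweepB]⟩, ?_, by simp [pvSweepB]⟩
    intro x; simp [pvSweepB, pvMemU_nil]
  | case3 x xs y ys s e hse ih1 ih2 =>
    intro hca hcb
    replace hse : max x.1 y.1 < min x.2 y.2 := hse
    have hcxs : pvCanon xs := ⟨fun p hp => hca.1 p (List.mem_cons_of_mem _ hp), hca.2.of_cons⟩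
    have hcys : pvCanon ys := ⟨fun p hp => hcb.1 p (List.mem_cons_of_mem _ hp), hcb.2.of_cons⟩
    have hx12 : x.1 < x.2 := hca.1 x List.mem_cons_self
    have hy12 : y.1 < y.2 := hcb.1 y List.mem_cons_self
    have hgx := pvStartsGt x xs hca
    have hgy := pvStartsGt y ys hcb
    by_cases hxy : x.2 ≤ y.2
    · obtain ⟨hcr, hmr, hbr⟩ := ih1 hcxs hcb
      have heq : pvSweepB (x :: xs) (y :: ys) =
          (max x.1 y.1, min x.2 y.2) :: pvSweepB xs (y :: ys) := by
        rw [pvSweepB]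
        rw [if_pos hxy, if_pos hse]
      refine ⟨⟨?_, ?_⟩, ?_, ?_⟩
      · intro p hp; rw [heq] at hp
        rcases List.mem_cons.mp hp with rfl | hp
        · exact hse
        · exact hcr.1 p hp
      · rw [heq]
        cases hr : pvSweepB xs (y :: ys) with
        | nil => exact List.IsChain.singleton _
        | cons r t =>
          rw [List.isChain_cons_cons]
          refine ⟨?_, by rw [← hr]; exact hcr.2⟩
          obtain ⟨q, hq, hql⟩ := (hbr r (by rw [hr]; exact List.mem_cons_self)).1
          have := hgx q hq
          change min x.2 y.2 < r.1
          omega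
      · intro x'
        rw [heq, pvMemU_cons, hmr x', pvMemU_cons, pvMemU_cons]
        constructor
        · rintro (h | ⟨h1, h2⟩)
          · unfold pvMemI at h ⊢
            simp only at h
            exact ⟨Or.inl ⟨by omega, by omega⟩, Or.inl ⟨by omega, by omega⟩⟩
          · exact ⟨Or.inr h1, h2⟩
        · rintro ⟨h1 | h1, h2⟩
          · rcases h2 with h2 | h2
            · left; unfold pvMemI at h1 h2 ⊢; simp only; omega
            · exfalso
              obtain ⟨q, hq, hmq⟩ := h2
              have := hgy q hq
              unfold pvMemI at h1 hmq
              omega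
          · exact Or.inr ⟨h1, h2⟩
      · intro p hp
        rw [heq] at hp
        rcases List.mem_cons.mp hp with rfl | hp
        · exact ⟨⟨x, List.mem_cons_self, by simp⟩, ⟨y, List.mem_cons_self, by simp⟩⟩
        · obtain ⟨⟨q1, hq1, h1⟩, hb2⟩ := hbr p hp
          exact ⟨⟨q1, List.mem_cons_of_mem _ hq1, h1⟩, hb2⟩
    · obtain ⟨hcr, hmr, hbr⟩ := ih2 hca hcys
      have heq : pvSweepB (x :: xs) (y :: ys) =
          (max x.1 y.1, min x.2 y.2) :: pvSweepB (x :: xs) ys := by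
        rw [pvSweepB]
        rw [if_neg hxy, if_pos hse]
      refine ⟨⟨?_, ?_⟩, ?_, ?_⟩
      · intro p hp; rw [heq] at hp
        rcases List.mem_cons.mp hp with rfl | hp
        · exact hse
        · exact hcr.1 p hp
      · rw [heq]
        cases hr : pvSweepB (x :: xs) ys with
        | nil => exact List.IsChain.singleton _
        | cons r t =>
          rw [List.isChain_cons_cons]
          refine ⟨?_, by rw [← hr]; exact hcr.2⟩
          obtain ⟨q, hq, hql⟩ := (hbr r (by rw [hr]; exact List.mem_cons_self)).2
          have := hgy q hq
          change min x.2 y.2 < r.1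
          omega
      · intro x'
        rw [heq, pvMemU_cons, hmr x', pvMemU_cons, pvMemU_cons]
        constructor
        · rintro (h | ⟨h1, h2⟩)
          · unfold pvMemI at h ⊢
            simp only at h
            exact ⟨Or.inl ⟨by omega, by omega⟩, Or.inl ⟨by omega, by omega⟩⟩
          · exact ⟨h1, Or.inr h2⟩
        · rintro ⟨h1, h2 | h2⟩
          · rcases h1 with h1 | h1
            · left; unfold pvMemI at h1 h2 ⊢; simp only; omega
            · exfalso
              obtain ⟨q, hq, hmq⟩ := h1
              have := hgx q hq
              unfold pvMemI at h2 hmq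
              omega
          · exact Or.inr ⟨h1, h2⟩
      · intro p hp
        rw [heq] at hp
        rcases List.mem_cons.mp hp with rfl | hp
        · exact ⟨⟨x, List.mem_cons_self, by simp⟩, ⟨y, List.mem_cons_self, by simp⟩⟩
        · obtain ⟨hb1, ⟨q2, hq2, h2⟩⟩ := hbr p hp
          exact ⟨hb1, ⟨q2, List.mem_cons_of_mem _ hq2, h2⟩⟩
  | case4 x xs y ys s e hse ih1 ih2 =>
    intro hca hcb
    replace hse : ¬ max x.1 y.1 < min x.2 y.2 := hse
    have hcxs : pvCanon xs := ⟨fun p hp => hca.1 p (List.mem_cons_of_mem _ hp), hca.2.of_cons⟩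
    have hcys : pvCanon ys := ⟨fun p hp => hcb.1 p (List.mem_cons_of_mem _ hp), hcb.2.of_cons⟩
    have hx12 : x.1 < x.2 := hca.1 x List.mem_cons_self
    have hy12 : y.1 < y.2 := hcb.1 y List.mem_cons_self
    have hgx := pvStartsGt x xs hca
    have hgy := pvStartsGt y ys hcb
    by_cases hxy : x.2 ≤ y.2
    · obtain ⟨hcr, hmr, hbr⟩ := ih1 hcxs hcb
      have heq : pvSweepB (x :: xs) (y :: ys) = pvSweepB xs (y :: ys) := by
        rw [pvSweepB]
        rw [if_pos hxy, if_neg hse]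
      refine ⟨by rw [heq]; exact hcr, ?_, ?_⟩
      · intro x'
        rw [heq, hmr x', pvMemU_cons, pvMemU_cons]
        constructor
        · rintro ⟨h1, h2⟩; exact ⟨Or.inr h1, h2⟩
        · rintro ⟨h1 | h1, h2⟩
          · exfalso
            rcases h2 with h2 | h2
            · unfold pvMemI at h1 h2; omega
            · obtain ⟨q, hq, hmq⟩ := h2
              have := hgy q hq
              unfold pvMemI at h1 hmq
              omega
          · exact ⟨h1, h2⟩
      · intro p hp
        rw [heq] at hp
        obtain ⟨⟨q1, hq1, h1⟩, hb2⟩ := hbr p hp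
        exact ⟨⟨q1, List.mem_cons_of_mem _ hq1, h1⟩, hb2⟩
    · obtain ⟨hcr, hmr, hbr⟩ := ih2 hca hcys
      have heq : pvSweepB (x :: xs) (y :: ys) = pvSweepB (x :: xs) ys := by
        rw [pvSweepB]
        rw [if_neg hxy, if_neg hse]
      refine ⟨by rw [heq]; exact hcr, ?_, ?_⟩
      · intro x'
        rw [heq, hmr x', pvMemU_cons, pvMemU_cons]
        constructor
        · rintro ⟨h1, h2⟩; exact ⟨h1, Or.inr h2⟩
        · rintro ⟨h1, h2 | h2⟩
          · exfalso
            rcases h1 with h1 | h1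
            · unfold pvMemI at h1 h2; omega
            · obtain ⟨q, hq, hmq⟩ := h1
              have := hgx q hq
              unfold pvMemI at h2 hmq
              omega
          · exact ⟨h1, h2⟩
      · intro p hp
        rw [heq] at hp
        obtain ⟨hb1, ⟨q2, hq2, h2⟩⟩ := hbr p hp
        exact ⟨hb1, ⟨q2, List.mem_cons_of_mem _ hq2, h2⟩⟩

-- A's nested loops produce exactly the flatMap of guarded pairwise intersections
def pvG (ib : List (Int × Int)) (a : Int × Int) : List (Int × Int) :=
  (ib.filter (fun b => decide (max a.1 b.1 < min a.2 b.2))).map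
    (fun b => (max a.1 b.1, min a.2 b.2))

theorem pvPairs_eq (ia ib : List (Int × Int)) (init : List (Int × Int)) :
    (ia.foldl (fun out a => ib.foldl (fun out b =>
      if max a.1 b.1 < min a.2 b.2 then out ++ [(max a.1 b.1, min a.2 b.2)] else out) out) init) =
    init ++ ia.flatMap (pvG ib) := by
  have h1 : ∀ (acc : List (Int × Int)) (a : Int × Int),
      ib.foldl (fun out b =>
        if max a.1 b.1 < min a.2 b.2 then out ++ [(max a.1 b.1, min a.2 b.2)] else out) acc =
      acc ++ pvG ib a := by
    intro acc a
    have := PySem.List.foldl_append_if (fun b => decide (max a.1 b.1 < min a.2 b.2))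
      (fun b : Int × Int => (max a.1 b.1, min a.2 b.2)) ib acc
    simp only [decide_eq_true_eq] at this
    exact this
  calc ia.foldl (fun out a => ib.foldl (fun out b =>
        if max a.1 b.1 < min a.2 b.2 then out ++ [(max a.1 b.1, min a.2 b.2)] else out) out) init
      = ia.foldl (fun out a => out ++ pvG ib a) init := by
        congr 1; funext out a; exact h1 out a
    _ = init ++ ia.flatMap (pvG ib) := PySem.List.foldl_append_eq_flatMap _ ia init

theorem pvPairs_mem (ia ib : List (Int × Int)) (x : Int) :
    pvMemU x (ia.flatMap (pvG ib)) ↔ pvMemU x ia ∧ pvMemU x ib := by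
  unfold pvMemU pvG
  constructor
  · rintro ⟨p, hp, hm⟩
    simp only [List.mem_flatMap, List.mem_map, List.mem_filter, decide_eq_true_eq] at hp
    obtain ⟨a, ha, b, ⟨hb, _⟩, rfl⟩ := hp
    unfold pvMemI at hm ⊢
    simp only at hm
    exact ⟨⟨a, ha, by omega⟩, ⟨b, hb, by omega⟩⟩
  · rintro ⟨⟨a, ha, hma⟩, ⟨b, hb, hmb⟩⟩
    unfold pvMemI at hma hmb
    refine ⟨(max a.1 b.1, min a.2 b.2), ?_, ?_⟩
    · simp only [List.mem_flatMap, List.mem_map, List.mem_filter, decide_eq_true_eq]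
      exact ⟨a, ha, b, ⟨hb, by omega⟩, rfl⟩
    · unfold pvMemI; simp only; omega

theorem pvPairs_lt (ia ib : List (Int × Int)) :
    ∀ p ∈ ia.flatMap (pvG ib), p.1 < p.2 := by
  intro p hp
  unfold pvG at hp
  simp only [List.mem_flatMap, List.mem_map, List.mem_filter, decide_eq_true_eq] at hp
  obtain ⟨a, _, b, ⟨_, hlt⟩, rfl⟩ := hp
  simpa using hlt

-- A's in-place merge loop is the (cs, ce)-carrying recursion
theorem pvMergeLoopA_eq : ∀ (t acc : List (Int × Int)) (cs ce : Int),
    pvMergeLoopA (acc ++ [(cs, ce)]) t = acc ++ pvMergeGoB cs ce t := by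
  intro t
  induction t with
  | nil => intro acc cs ce; rfl
  | cons p t ih =>
    intro acc cs ce
    obtain ⟨s, e⟩ := p
    have hstep : pvMergeLoopA (acc ++ [(cs, ce)]) ((s, e) :: t) =
        pvMergeLoopA (if s ≤ ce then acc ++ [(cs, max ce e)]
          else (acc ++ [(cs, ce)]) ++ [(s, e)]) t := by
      unfold pvMergeLoopA
      rw [List.foldl_cons]
      congr 1
      rw [List.getLast?_concat]
      by_cases hc : s ≤ ce
      · simp only [hc, if_pos, List.dropLast_concat]
      · simp only [hc, if_neg, not_false_iff]
    rw [hstep]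
    by_cases hc : s ≤ ce
    · rw [if_pos hc, ih, show pvMergeGoB cs ce ((s, e) :: t) = pvMergeGoB cs (max ce e) t by
        simp [pvMergeGoB, hc]]
    · rw [if_neg hc, ih, show pvMergeGoB cs ce ((s, e) :: t) = (cs, ce) :: pvMergeGoB s e t by
        simp [pvMergeGoB, hc], List.append_assoc]
      rfl

-- ===== VERDICT (by name: the statement is the Claim_ definition above) =====
theorem intersect_intervals_py_spec : Claim_equal_intersect_intervals_py := by
  unfold Claim_equal_intersect_intervals_py
  intro ia ib _
  unfold Spec_intersect_intervals_py
  have halt : intersect_intervals_py_alt ia ib = pvSweepB (pvCanonB ia) (pvCanonB ib) := rfl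
  obtain ⟨hcA, hmA⟩ := pvCanonB_spec ia
  obtain ⟨hcB, hmB⟩ := pvCanonB_spec ib
  obtain ⟨hcR, hmR, _⟩ := pvSweepB_spec (pvCanonB ia) (pvCanonB ib) hcA hcB
  have hmRB : ∀ x, pvMemU x (pvSweepB (pvCanonB ia) (pvCanonB ib)) ↔ pvMemU x ia ∧ pvMemU x ib := by
    intro x
    rw [hmR x, hmA x, hmB x]
  have hA : intersect_intervals_py ia ib = (if ia.flatMap (pvG ib) = [] then [] else
      match PySem.List.sorted (ia.flatMap (pvG ib)) (fun x => x.1) false with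
      | [] => []
      | h :: t => pvMergeLoopA [h] t) := by
    simp only [intersect_intervals_py]
    rw [pvPairs_eq, List.nil_append]
  have hmP := pvPairs_mem ia ib
  have hltP := pvPairs_lt ia ib
  rw [halt]
  by_cases hPe : ia.flatMap (pvG ib) = []
  · rw [hA, if_pos hPe]
    apply pvUniq _ _ ⟨by simp, by simp⟩ hcR
    intro x
    rw [pvMemU_nil, hmRB x, ← hmP x, hPe, pvMemU_nil]
  · rw [hA, if_neg hPe]
    cases hs : PySem.List.sorted (ia.flatMap (pvG ib)) (fun x => x.1) false with
    | nil => exact absurd ((PySem.List.sorted_eq_nil_iff _ _ _).mp hs) hPe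
    | cons h t =>
      have hperm := PySem.List.sorted_perm (ia.flatMap (pvG ib)) (fun x => x.1) false
      rw [hs] at hperm
      have hpw := PySem.List.sorted_pairwise (ia.flatMap (pvG ib)) (fun x => x.1)
      rw [hs] at hpw
      have hlt : ∀ p ∈ h :: t, p.1 < p.2 := fun p hp => hltP p (hperm.mem_iff.mp hp)
      obtain ⟨hcM, hmM, _⟩ := pvMergeGoB_spec t h.1 h.2 (hlt h List.mem_cons_self)
        (fun p hp => hlt p (List.mem_cons_of_mem _ hp))
        (List.pairwise_cons.mp hpw).1
        (List.pairwise_cons.mp hpw).2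
      have hML : pvMergeLoopA [h] t = pvMergeGoB h.1 h.2 t := by
        have := pvMergeLoopA_eq t [] h.1 h.2
        simpa using this
      show pvMergeLoopA [h] t = pvSweepB (pvCanonB ia) (pvCanonB ib)
      rw [hML]
      apply pvUniq _ _ hcM hcR
      intro x
      rw [hmM x, hmRB x, ← hmP x, show pvMemU x (ia.flatMap (pvG ib)) ↔ pvMemU x (h :: t) from (pvMemU_of_perm hperm x).symm, pvMemU_cons]
      unfold pvMemI
      tauto
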